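-- pv_equiv track=rewrite | github.com/lagillenwater/multi-dwpc | scripts/plot_metapath_subgraphs.py | metapath_display
-- ===== SOURCE A (Python) =====
-- def metapath_display(metapath: str) -> str:
--     """Hyphen-separate the metapath abbreviation between node types and edges.
--
--     "GaDlAiD" -> "G-a-D-l-A-i-D"
--     "GpBPpG"  -> "G-p-BP-p-G"
--     """
--     tokens: list[str] = []
--     i = 0
--     while i < len(metapath):
--         ch = metapath[i]
--         if ch.isupper():
--             j = i
--             while j < len(metapath) and metapath[j].isupper():
--                 j += 1
--             tokens.append(metapath[i:j])
--             i = j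
--         else:
--             tokens.append(ch)
--             i += 1
--     return "-".join(tokens)
-- ===== SOURCE B (Python) =====
-- def metapath_display(metapath: str) -> str:
--     """Hyphen-separate the metapath in one pass: a '-' is inserted before each
--     character except when it and its predecessor are both uppercase."""
--     out = []
--     prev = None
--     for ch in metapath:
--         if prev is not None and not (ch.isupper() and prev.isupper()):
--             out.append('-')
--         out.append(ch)
--         prev = ch
--     return ''.join(out)
-- ===== Notes on version B (the rewrite author's own statement) =====
-- stated objective: simpler
-- what changed: A tokenizes the string (grouping uppercase runs via a nested index scan) and joins the token list with '-'; B keeps no token list and makes a single pairwise pass, emitting '-' before each character unless it and its predecessor are both uppercase.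
import Mathlib
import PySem

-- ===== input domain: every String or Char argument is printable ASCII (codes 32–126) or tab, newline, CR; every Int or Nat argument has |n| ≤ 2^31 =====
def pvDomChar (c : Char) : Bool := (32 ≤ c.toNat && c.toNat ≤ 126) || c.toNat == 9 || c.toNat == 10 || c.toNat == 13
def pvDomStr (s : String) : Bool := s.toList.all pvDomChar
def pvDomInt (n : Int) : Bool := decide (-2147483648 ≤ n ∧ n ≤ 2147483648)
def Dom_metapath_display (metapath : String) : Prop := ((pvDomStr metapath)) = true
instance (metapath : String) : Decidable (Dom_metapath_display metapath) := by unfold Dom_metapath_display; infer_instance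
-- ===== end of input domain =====

-- B changes the decomposition: no token list, a single pairwise pass deciding each hyphen locally.

-- ===== PORT A =====
-- inner while loop: advance j while j < len and metapath[j].isupper()
def pvAScan (cs : List Char) (j : Nat) : Nat :=
  if h : j < cs.length ∧ PySem.Chars.isupper cs[j]! then pvAScan cs (j + 1) else j
termination_by cs.length - j
decreasing_by omega

theorem pvAScan_gt (cs : List Char) (j : Nat) (hj : j < cs.length)
    (hu : PySem.Chars.isupper cs[j]! = true) : j < pvAScan cs j := by
  unfold pvAScan
  rw [dif_pos ⟨hj, hu⟩]
  by_cases h2 : j + 1 < cs.length ∧ PySem.Chars.isupper cs[j+1]! = true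
  · have := pvAScan_gt cs (j + 1) h2.1 h2.2
    omega
  · unfold pvAScan; rw [dif_neg h2]; omega
termination_by cs.length - j
decreasing_by omega

-- outer while loop over index i, accumulating tokens
def pvALoop (cs : List Char) (i : Nat) (tokens : List (List Char)) : List (List Char) :=
  if h : i < cs.length then
    if PySem.Chars.isupper cs[i]! then
      pvALoop cs (pvAScan cs i)
        (tokens ++ [PySem.Chars.slice cs (some (i : Int)) (some ((pvAScan cs i) : Int))])
    else
      pvALoop cs (i + 1) (tokens ++ [[cs[i]!]])
  else tokens
termination_by cs.length - i
decreasing_by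
  · have := pvAScan_gt cs i h (by simpa using ‹PySem.Chars.isupper cs[i]! = true›); omega
  · omega

def metapath_display (metapath : String) : String :=
  String.mk (PySem.Chars.join ['-'] (pvALoop metapath.toList 0 []))

-- ===== PORT B =====
-- one fold over the characters carrying (output chars, previous char)
def metapath_display_alt (metapath : String) : String :=
  let st := metapath.toList.foldl
    (fun (acc : List Char × Option Char) ch =>
      let out :=
        match acc.2 with
        | some p => if PySem.Chars.isupper ch && PySem.Chars.isupper p then acc.1 else acc.1 ++ ['-']
        | none => acc.1
      (out ++ [ch], some ch))
    ([], none)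
  String.mk st.1

-- ===== PRECONDITION & SPEC =====
def Spec_metapath_display (metapath : String) (out : String) : Prop := out = metapath_display_alt metapath
instance (metapath : String) (out : String) : Decidable (Spec_metapath_display metapath out) := by unfold Spec_metapath_display; infer_instance

-- ===== CLAIM (what is proved, stated in full; the proofs are below) =====
def Claim_equal_metapath_display : Prop := ∀ (metapath : String), Dom_metapath_display metapath → Spec_metapath_display metapath (metapath_display metapath)

-- ===== LEMMAS AND PROOFS =====

-- spec helper: the output after a run start, previous char p still pending comparison
def pvG (p : Char) : List Char → List Char
  | [] => []
  | c :: r =>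
      (if PySem.Chars.isupper c && PySem.Chars.isupper p then [c] else ['-', c]) ++ pvG c r

-- functional tokenizer mirroring A's loop
def pvTok : List Char → List (List Char)
  | [] => []
  | c :: r =>
      if PySem.Chars.isupper c then
        (c :: r.takeWhile PySem.Chars.isupper) :: pvTok (r.dropWhile PySem.Chars.isupper)
      else [c] :: pvTok r
termination_by l => l.length
decreasing_by
  · have := List.length_dropWhile_le (p := PySem.Chars.isupper) (l := r); simp; omega
  · simp

theorem pvAScan_eq (cs : List Char) (i : Nat) (hi : i ≤ cs.length) :
    pvAScan cs i = i + ((cs.drop i).takeWhile PySem.Chars.isupper).length := by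
  by_cases h : i < cs.length
  · have hg : cs[i]! = cs[i] := getElem!_pos cs i h
    have hdrop : cs.drop i = cs[i]! :: cs.drop (i + 1) := by
      rw [hg]; exact (List.getElem_cons_drop h).symm
    by_cases hu : PySem.Chars.isupper cs[i]! = true
    · have ih := pvAScan_eq cs (i + 1) (by omega)
      unfold pvAScan
      rw [dif_pos ⟨h, hu⟩, ih, hdrop, List.takeWhile_cons_of_pos hu]
      simp; omega
    · unfold pvAScan
      rw [dif_neg (fun hh => hu hh.2), hdrop,
        List.takeWhile_cons_of_neg (by simpa using hu)]
      simp
  · have hieq : i = cs.length := by omega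
    subst hieq
    unfold pvAScan
    rw [dif_neg (fun hh => absurd hh.1 (lt_irrefl _))]
    simp
termination_by cs.length - i
decreasing_by omega

-- drop past the takeWhile block is the dropWhile remainder
theorem pvDropLen (l : List Char) :
    List.drop ((l.takeWhile PySem.Chars.isupper).length) l
      = l.dropWhile PySem.Chars.isupper := by
  induction l with
  | nil => simp
  | cons a t ih =>
    by_cases hp : PySem.Chars.isupper a = true
    · simp [List.takeWhile_cons_of_pos hp, List.dropWhile_cons_of_pos hp, ih]
    · simp [List.takeWhile_cons_of_neg (by simpa using hp),
        List.dropWhile_cons_of_neg (by simpa using hp)]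

theorem pvALoop_eq (cs : List Char) (i : Nat) (tokens : List (List Char)) (hi : i ≤ cs.length) :
    pvALoop cs i tokens = tokens ++ pvTok (cs.drop i) := by
  by_cases h : i < cs.length
  · have hg : cs[i]! = cs[i] := getElem!_pos cs i h
    have hdrop : cs.drop i = cs[i]! :: cs.drop (i + 1) := by
      rw [hg]; exact (List.getElem_cons_drop h).symm
    by_cases hu : PySem.Chars.isupper cs[i]! = true
    · have hscan := pvAScan_eq cs i (by omega)
      have hlen : ((cs.drop i).takeWhile PySem.Chars.isupper).length ≤ (cs.drop i).length :=
        (List.takeWhile_prefix _).length_le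
      have hld : (cs.drop i).length = cs.length - i := List.length_drop
      have hjle : pvAScan cs i ≤ cs.length := by omega
      have hslice : PySem.Chars.slice cs (some (i : Int)) (some ((pvAScan cs i) : Int))
          = (cs.drop i).takeWhile PySem.Chars.isupper := by
        rw [PySem.Chars.slice_eq_listSlice,
          PySem.List.slice_toNat cs (Int.natCast_nonneg i) (Int.natCast_nonneg _)]
        simp only [Int.toNat_natCast, hscan]
        have h2 : i + ((cs.drop i).takeWhile PySem.Chars.isupper).length - i
            = ((cs.drop i).takeWhile PySem.Chars.isupper).length := by omega
        rw [h2]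
        exact (List.prefix_iff_eq_take.mp (List.takeWhile_prefix _)).symm
      have hdrop2 : cs.drop (pvAScan cs i) = (cs.drop i).dropWhile PySem.Chars.isupper := by
        rw [hscan, ← pvDropLen (cs.drop i), List.drop_drop]
      have ih := pvALoop_eq cs (pvAScan cs i)
        (tokens ++ [PySem.Chars.slice cs (some (i : Int)) (some ((pvAScan cs i) : Int))]) hjle
      unfold pvALoop
      rw [dif_pos h, if_pos hu, ih, hslice, hdrop2]
      conv_rhs => rw [hdrop]
      rw [pvTok, if_pos hu]
      rw [hdrop, List.takeWhile_cons_of_pos hu, List.dropWhile_cons_of_pos hu]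
      simp
    · have ih := pvALoop_eq cs (i + 1) (tokens ++ [[cs[i]!]]) (by omega)
      unfold pvALoop
      rw [dif_pos h, if_neg hu, ih]
      conv_rhs => rw [hdrop]
      rw [pvTok, if_neg hu]
      simp
  · have hieq : i = cs.length := by omega
    subst hieq
    unfold pvALoop
    rw [dif_neg (lt_irrefl _), List.drop_length, pvTok]
    simp
termination_by cs.length - i
decreasing_by
  · have := pvAScan_gt cs i h hu; omega
  · omega

theorem pvTok_ne_nil (c : Char) (r : List Char) : pvTok (c :: r) ≠ [] := by
  rw [pvTok]; split <;> simp

theorem pvJoin_cons (sep : List Char) (c : Char) (x : List Char) (ts : List (List Char)) :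
    PySem.Chars.join sep ((c :: x) :: ts) = c :: PySem.Chars.join sep (x :: ts) := by
  cases ts with
  | nil => rw [PySem.Chars.join_singleton, PySem.Chars.join_singleton]
  | cons y ts => rw [PySem.Chars.join_cons_cons, PySem.Chars.join_cons_cons]; simp

-- A's joined tokens equal the pairwise output
theorem pvJoin_tok (c : Char) (r : List Char) :
    PySem.Chars.join ['-'] (pvTok (c :: r)) = c :: pvG c r := by
  induction r generalizing c with
  | nil => simp [pvTok, pvG, PySem.Chars.join_singleton]
  | cons d t ih =>
    obtain ⟨x, ts, hcase⟩ := List.exists_cons_of_ne_nil (pvTok_ne_nil d t)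
    by_cases hc : PySem.Chars.isupper c = true
    · by_cases hd : PySem.Chars.isupper d = true
      · have e1 : pvTok (c :: d :: t)
            = (c :: (d :: t).takeWhile PySem.Chars.isupper)
              :: pvTok ((d :: t).dropWhile PySem.Chars.isupper) := by
          rw [pvTok, if_pos hc]
        have e2 : pvTok (d :: t)
            = (d :: t.takeWhile PySem.Chars.isupper)
              :: pvTok (t.dropWhile PySem.Chars.isupper) := by
          rw [pvTok, if_pos hd]
        have e3 : (d :: t).takeWhile PySem.Chars.isupper
            = d :: t.takeWhile PySem.Chars.isupper := List.takeWhile_cons_of_pos hd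
        have e4 : (d :: t).dropWhile PySem.Chars.isupper
            = t.dropWhile PySem.Chars.isupper := List.dropWhile_cons_of_pos hd
        rw [e1, e3, e4, pvJoin_cons, ← e2, ih, pvG, if_pos (by simp [hc, hd])]
        simp
      · have e1 : pvTok (c :: d :: t) = [c] :: pvTok (d :: t) := by
          rw [pvTok, if_pos hc, List.takeWhile_cons_of_neg (by simpa using hd),
            List.dropWhile_cons_of_neg (by simpa using hd)]
        rw [e1, hcase, PySem.Chars.join_cons_cons, ← hcase, ih, pvG, if_neg (by simp [hd])]
        simp
    · have e1 : pvTok (c :: d :: t) = [c] :: pvTok (d :: t) := by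
        rw [pvTok, if_neg hc]
      rw [e1, hcase, PySem.Chars.join_cons_cons, ← hcase, ih, pvG, if_neg (by simp [hc])]
      simp

-- B's fold, after the first character, appends pvG
theorem pvFold_eq (l : List Char) (out : List Char) (p : Char) :
    (l.foldl
      (fun (acc : List Char × Option Char) ch =>
        let out :=
          match acc.2 with
          | some q => if PySem.Chars.isupper ch && PySem.Chars.isupper q then acc.1 else acc.1 ++ ['-']
          | none => acc.1
        (out ++ [ch], some ch))
      (out, some p)).1 = out ++ pvG p l := by
  induction l generalizing out p with
  | nil => simp [pvG]
  | cons c r ih =>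
    simp only [List.foldl_cons]
    rw [pvG]
    by_cases h : PySem.Chars.isupper c && PySem.Chars.isupper p
    · simp only [h, ih]; simp
    · simp only [h]
      rw [if_neg (by simpa using h), ih]
      simp

-- ===== VERDICT (by name: the statement is the Claim_ definition above) =====
theorem metapath_display_spec : Claim_equal_metapath_display := by
  intro s _
  unfold Spec_metapath_display metapath_display metapath_display_alt
  rcases hl : s.toList with _ | ⟨c, r⟩
  · rw [pvALoop_eq _ 0 [] (by simp)]
    simp [pvTok, PySem.Chars.join_nil]
  · rw [pvALoop_eq _ 0 [] (by simp), List.drop_zero]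
    simp only [List.nil_append, List.foldl_cons]
    rw [pvJoin_tok]
    have hB := pvFold_eq r [c] c
    simp only [] at hB ⊢
    rw [hB]
    simp
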